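-- pv_equiv track=rewrite | github.com/MaxZhuravlev/physics-cosmo-bridge | src/multiple_spatial_curvature.py | create_tetrahedral_3d
-- ===== SOURCE A (Python) =====
-- def create_tetrahedral_3d(size=2):
--     """Create 3D tetrahedral mesh"""
--     edges = []
--     for i in range(size):
--         for j in range(size):
--             for k in range(size):
--                 # Base index
--                 base = i * size * size + j * size + k
--                 # Tetrahedron (4 vertices)
--                 n1 = base
--                 n2 = base + 1
--                 n3 = base + size
--                 n4 = base + size * size
--                 edges.append((n1, n2, n3, n4))
--
--     return edges
-- ===== SOURCE B (Python) =====
-- def create_tetrahedral_3d(size=2):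
--     """Create 3D tetrahedral mesh"""
--     # base = i*size*size + j*size + k runs exactly through 0..size**3-1 in order,
--     # so a single pass over that counter replaces the three nested loops.
--     return [(base, base + 1, base + size, base + size * size)
--             for base in range(size * size * size)]
-- ===== Notes on version B (the rewrite author's own statement) =====
-- stated objective: simpler
-- what changed: Replaces the three nested loops and the index arithmetic base = i*size*size + j*size + k by a single comprehension over the sequential counter range(size**3), which is exactly that base index in order.
import Mathlib
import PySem

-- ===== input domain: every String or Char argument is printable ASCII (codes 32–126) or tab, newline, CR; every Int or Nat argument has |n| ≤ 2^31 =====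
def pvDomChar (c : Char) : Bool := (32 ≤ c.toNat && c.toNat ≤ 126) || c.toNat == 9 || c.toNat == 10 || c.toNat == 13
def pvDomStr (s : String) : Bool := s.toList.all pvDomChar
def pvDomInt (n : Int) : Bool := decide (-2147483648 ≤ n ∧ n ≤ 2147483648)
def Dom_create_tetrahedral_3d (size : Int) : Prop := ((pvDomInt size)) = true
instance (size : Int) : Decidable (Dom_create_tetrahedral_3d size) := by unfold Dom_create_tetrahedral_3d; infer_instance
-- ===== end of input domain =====

-- B replaces A's three nested loops by one comprehension over the sequential counter range(size^3): simpler, same output.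


-- ===== PORT A =====
def create_tetrahedral_3d (size : Int) : List (Int × Int × Int × Int) :=
  (PySem.List.pyRange 0 size 1).foldl (fun edges i =>
    (PySem.List.pyRange 0 size 1).foldl (fun edges j =>
      (PySem.List.pyRange 0 size 1).foldl (fun edges k =>
        let base := i * size * size + j * size + k
        let n1 := base
        let n2 := base + 1
        let n3 := base + size
        let n4 := base + size * size
        edges ++ [(n1, n2, n3, n4)]) edges) edges) []

-- ===== PORT B =====
def create_tetrahedral_3d_alt (size : Int) : List (Int × Int × Int × Int) :=
  (PySem.List.pyRange 0 (size * size * size) 1).map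
    (fun base => (base, base + 1, base + size, base + size * size))

-- ===== PRECONDITION & SPEC =====
def Spec_create_tetrahedral_3d (size : Int) (out : List (Int × Int × Int × Int)) : Prop := out = create_tetrahedral_3d_alt size
instance (size : Int) (out : List (Int × Int × Int × Int)) : Decidable (Spec_create_tetrahedral_3d size out) := by unfold Spec_create_tetrahedral_3d; infer_instance

-- ===== CLAIM (what is proved, stated in full; the proofs are below) =====
def Claim_equal_create_tetrahedral_3d : Prop := ∀ (size : Int), Dom_create_tetrahedral_3d size → Spec_create_tetrahedral_3d size (create_tetrahedral_3d size)

-- ===== LEMMAS AND PROOFS =====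

-- n consecutive blocks of an inner `range s` pass, block j offset by j*s (plus a constant c),
-- are one pass over `range (n*s)` with offset c.
theorem pv_int_block {α : Type} (s c : Int) (hs : 0 ≤ s) (g : Int → α) :
    ∀ n : Int, 0 ≤ n →
      (PySem.List.pyRange 0 n 1).flatMap
          (fun j => (PySem.List.pyRange 0 s 1).map (fun k => g (c + j * s + k)))
        = (PySem.List.pyRange 0 (n * s) 1).map (fun t => g (c + t)) := by
  refine Int.le_induction ?_ ?_
  · simp [PySem.List.pyRange_one_eq_nil (le_refl (0 : Int))]
  · intro n hn ih
    rw [PySem.List.pyRange_one_succ_right hn, List.flatMap_append, ih,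
      show (n + 1) * s = n * s + s by ring,
      PySem.List.pyRange_one_append 0 (n * s) (n * s + s) (mul_nonneg hn hs) (by linarith),
      List.map_append]
    congr 1
    rw [List.flatMap_cons, List.flatMap_nil, List.append_nil,
      PySem.List.pyRange_one, PySem.List.pyRange_one, List.map_map, List.map_map,
      show n * s + s - n * s = s - 0 by ring]
    exact List.map_congr_left (fun k _ => congrArg g (by push_cast; ring))

theorem create_tetrahedral_3d_eq (size : Int) :
    create_tetrahedral_3d size = create_tetrahedral_3d_alt size := by
  unfold create_tetrahedral_3d create_tetrahedral_3d_alt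
  simp only [PySem.List.foldl_append_singleton_eq_map, PySem.List.foldl_append_eq_flatMap,
    List.nil_append]
  by_cases h : size ≤ 0
  · have h3 : size * size * size ≤ 0 := mul_nonpos_of_nonneg_of_nonpos (mul_self_nonneg size) h
    rw [PySem.List.pyRange_one_eq_nil h, PySem.List.pyRange_one_eq_nil h3]
    simp
  · have hsz : 0 ≤ size := by omega
    show (PySem.List.pyRange 0 size 1).flatMap
        (fun i => (PySem.List.pyRange 0 size 1).flatMap
          (fun j => (PySem.List.pyRange 0 size 1).map
            (fun k => (fun base : Int => (base, base + 1, base + size, base + size * size))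
              (i * size * size + j * size + k))))
      = (PySem.List.pyRange 0 (size * size * size) 1).map
          (fun base : Int => (base, base + 1, base + size, base + size * size))
    simp only [fun i => pv_int_block size (i * size * size) hsz
      (fun base : Int => (base, base + 1, base + size, base + size * size)) size hsz]
    simp only [show ∀ i t : Int, i * size * size + t = 0 + i * (size * size) + t by
      intro i t; ring]
    rw [pv_int_block (size * size) 0 (mul_nonneg hsz hsz)
      (fun base : Int => (base, base + 1, base + size, base + size * size)) size hsz,
      show size * (size * size) = size * size * size by ring]
    simp

-- ===== VERDICT (by name: the statement is the Claim_ definition above) =====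
theorem create_tetrahedral_3d_spec : Claim_equal_create_tetrahedral_3d := by
  intro size _
  exact create_tetrahedral_3d_eq size
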